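-- pv_equiv track=rewrite | github.com/chendry10/TennisAnalytics | app.py | preferred_sheet_index
-- ===== SOURCE A (Python) =====
-- def preferred_sheet_index(sheet_names: list[str]) -> int:
--     for index, sheet_name in enumerate(sheet_names):
--         if str(sheet_name).strip().lower() == "shots":
--             return index
--     for index, sheet_name in enumerate(sheet_names):
--         if str(sheet_name).strip().lower() == "stats":
--             return index
--     return 0
-- ===== SOURCE B (Python) =====
-- def preferred_sheet_index(sheet_names: list[str]) -> int:
--     stats_index = None
--     for index, sheet_name in enumerate(sheet_names):
--         key = str(sheet_name).strip().lower()
--         if key == "shots":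
--             return index
--         if key == "stats" and stats_index is None:
--             stats_index = index
--     return stats_index if stats_index is not None else 0
-- ===== Notes on version B (the rewrite author's own statement) =====
-- stated objective: alternative
-- what changed: Replaces A's two sequential scans with a single pass that records the first 'stats' index while searching for 'shots'.
import Mathlib
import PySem

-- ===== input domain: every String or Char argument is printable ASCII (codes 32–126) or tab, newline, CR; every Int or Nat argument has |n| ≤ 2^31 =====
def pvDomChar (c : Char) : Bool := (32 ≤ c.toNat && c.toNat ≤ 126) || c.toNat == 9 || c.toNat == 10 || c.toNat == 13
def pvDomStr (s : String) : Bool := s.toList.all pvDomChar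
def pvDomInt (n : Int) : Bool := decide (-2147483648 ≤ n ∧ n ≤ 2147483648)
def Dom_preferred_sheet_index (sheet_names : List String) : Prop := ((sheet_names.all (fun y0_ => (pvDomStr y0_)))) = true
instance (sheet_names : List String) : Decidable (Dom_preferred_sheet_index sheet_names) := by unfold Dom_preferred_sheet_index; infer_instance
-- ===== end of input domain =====

-- B replaces A's two sequential scans by one pass that records the first "stats" index while searching for "shots" (alternative decomposition, same cost).

-- ===== PORT A =====
-- first loop of A: return index of first entry whose strip().lower() == "shots"
def pvFindShots : List String → Int → Option Int
  | [], _ => none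
  | s :: rest, i =>
    if PySem.Str.lower (PySem.Str.strip s) = "shots" then some i
    else pvFindShots rest (i + 1)

-- second loop of A: same with "stats"
def pvFindStats : List String → Int → Option Int
  | [], _ => none
  | s :: rest, i =>
    if PySem.Str.lower (PySem.Str.strip s) = "stats" then some i
    else pvFindStats rest (i + 1)

def preferred_sheet_index (sheet_names : List String) : Int :=
  match pvFindShots sheet_names 0 with
  | some i => i
  | none =>
    match pvFindStats sheet_names 0 with
    | some i => i
    | none => 0

-- ===== PORT B =====
-- single pass carrying the optional first "stats" index
def pvAltLoop : List String → Int → Option Int → Int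
  | [], _, st => st.getD 0
  | s :: rest, i, st =>
    let key := PySem.Str.lower (PySem.Str.strip s)
    if key = "shots" then i
    else pvAltLoop rest (i + 1) (if key = "stats" ∧ st = none then some i else st)

def preferred_sheet_index_alt (sheet_names : List String) : Int :=
  pvAltLoop sheet_names 0 none

-- ===== PRECONDITION & SPEC =====
def Spec_preferred_sheet_index (sheet_names : List String) (out : Int) : Prop := out = preferred_sheet_index_alt sheet_names
instance (sheet_names : List String) (out : Int) : Decidable (Spec_preferred_sheet_index sheet_names out) := by unfold Spec_preferred_sheet_index; infer_instance

-- ===== CLAIM (what is proved, stated in full; the proofs are below) =====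
def Claim_equal_preferred_sheet_index : Prop := ∀ (sheet_names : List String), Dom_preferred_sheet_index sheet_names → Spec_preferred_sheet_index sheet_names (preferred_sheet_index sheet_names)

-- ===== LEMMAS AND PROOFS =====
lemma pvAltLoop_eq (xs : List String) (i : Int) (st : Option Int) :
    pvAltLoop xs i st =
      match pvFindShots xs i with
      | some j => j
      | none =>
        match st with
        | some k => k
        | none =>
          match pvFindStats xs i with
          | some j => j
          | none => 0 := by
  induction xs generalizing i st with
  | nil =>
    cases st <;> simp [pvAltLoop, pvFindShots, pvFindStats, Option.getD]
  | cons s rest ih =>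
    simp only [pvAltLoop, pvFindShots, pvFindStats]
    by_cases hsh : PySem.Str.lower (PySem.Str.strip s) = "shots"
    · simp [hsh]
    · by_cases hst : PySem.Str.lower (PySem.Str.strip s) = "stats"
      · cases st with
        | none => simp [hsh, hst, ih]
        | some k => simp [hsh, hst, ih]
      · cases st with
        | none => simp [hsh, hst, ih]
        | some k => simp [hsh, hst, ih]

-- ===== VERDICT (by name: the statement is the Claim_ definition above) =====
theorem preferred_sheet_index_spec : Claim_equal_preferred_sheet_index := by
  intro xs _
  unfold Spec_preferred_sheet_index preferred_sheet_index preferred_sheet_index_alt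
  rw [pvAltLoop_eq]
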